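-- pv_equiv track=rewrite | github.com/Kra09-kp/StoryCreationn | CreateStory.py | extract_prompt_and_dialogue
-- ===== SOURCE A (Python) =====
-- def extract_prompt_and_dialogue(story):
--     l = story.split('\n\n')
--     prompt = []
--     dialogue = []
--     n = len(l)
--     for i in range(n):
--         s = l[i].index(":")
--         if i%2==0:
--             prompt.append(l[i][s+1:])
--         else:
--             dialogue.append(l[i][s+1:])
--
--     return prompt,dialogue
-- ===== SOURCE B (Python) =====
-- def extract_prompt_and_dialogue(story):
--     l = story.split('\n\n')
--     prompt = [b[b.index(":") + 1:] for b in l[::2]]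
--     dialogue = [b[b.index(":") + 1:] for b in l[1::2]]
--     return prompt, dialogue
-- ===== Notes on version B (the rewrite author's own statement) =====
-- stated objective: idiomatic
-- what changed: Replaces the single index loop with an i%2 branch by two independent comprehensions over the even- and odd-strided slices l[::2] and l[1::2].
import Mathlib
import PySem

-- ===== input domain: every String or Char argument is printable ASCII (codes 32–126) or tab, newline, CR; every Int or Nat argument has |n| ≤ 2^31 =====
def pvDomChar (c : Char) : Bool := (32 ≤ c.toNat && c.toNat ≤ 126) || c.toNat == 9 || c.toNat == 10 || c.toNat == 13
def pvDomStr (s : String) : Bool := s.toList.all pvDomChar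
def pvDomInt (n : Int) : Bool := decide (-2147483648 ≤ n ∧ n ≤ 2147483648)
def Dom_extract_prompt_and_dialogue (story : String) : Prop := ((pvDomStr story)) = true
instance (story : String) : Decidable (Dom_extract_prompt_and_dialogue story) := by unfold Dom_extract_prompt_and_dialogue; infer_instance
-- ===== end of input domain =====

-- B replaces the single index loop with its i%2 branch by two comprehensions over the even/odd strided slices (idiomatic decomposition; same cost).


-- ===== PORT A =====
-- b[b.index(":")+1:]: under Pre_ every block contains ":", so Str.find equals str.index there
def pvColonTail (b : String) : String :=
  PySem.Str.slice b (some (PySem.Str.find b ":" + 1)) none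

def extract_prompt_and_dialogue (story : String) : List String × List String :=
  let l := (PySem.Str.split? story "\n\n").getD []   -- sep "\n\n" ≠ "", so split? is `some` (exact)
  let n : Int := l.length
  (PySem.List.pyRange 0 n 1).foldl
    (fun acc i =>
      let b := PySem.List.pyGetD l i ""
      if PySem.Int.mod i 2 = 0 then (acc.1 ++ [pvColonTail b], acc.2)
      else (acc.1, acc.2 ++ [pvColonTail b]))
    ([], [])

-- ===== PORT B =====
def extract_prompt_and_dialogue_alt (story : String) : List String × List String :=
  let l := (PySem.Str.split? story "\n\n").getD []   -- sep "\n\n" ≠ "", so split? is `some` (exact)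
  (((PySem.List.slice? l none none 2).getD []).map pvColonTail,
   ((PySem.List.slice? l (some 1) none 2).getD []).map pvColonTail)

-- ===== PRECONDITION & SPEC =====
-- Pre_ excludes exactly the inputs where some '\n\n'-separated block lacks ':' — there A raises ValueError (str.index).
def Pre_extract_prompt_and_dialogue (story : String) : Prop :=
  ∀ b ∈ (PySem.Str.split? story "\n\n").getD [], PySem.Str.isIn ":" b = true
instance (story : String) : Decidable (Pre_extract_prompt_and_dialogue story) := by unfold Pre_extract_prompt_and_dialogue; infer_instance

def pvWitness_extract_prompt_and_dialogue : String := "a: hi\n\nb: yo"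

def Spec_extract_prompt_and_dialogue (story : String) (out : List String × List String) : Prop := out = extract_prompt_and_dialogue_alt story
instance (story : String) (out : List String × List String) : Decidable (Spec_extract_prompt_and_dialogue story out) := by unfold Spec_extract_prompt_and_dialogue; infer_instance

-- ===== CLAIM (what is proved, stated in full; the proofs are below) =====
def Claim_equal_extract_prompt_and_dialogue : Prop := ∀ (story : String), Dom_extract_prompt_and_dialogue story → Pre_extract_prompt_and_dialogue story → Spec_extract_prompt_and_dialogue story (extract_prompt_and_dialogue story)

-- ===== LEMMAS AND PROOFS =====

-- every other element starting at the head (what l[::2] selects); l[1::2] selects pvEvens l.tail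
def pvEvens {α : Type} : List α → List α
  | [] => []
  | [x] => [x]
  | x :: _ :: xs => x :: pvEvens xs

theorem pvEvens_cons_tail {α : Type} (a : α) (l : List α) :
    pvEvens (a :: l) = a :: pvEvens l.tail := by
  cases l <;> rfl

theorem pvFilterMap_range_evens {α : Type} (l : List α) :
    (List.range ((l.length + 1) / 2)).filterMap (fun k => l[2 * k]?) = pvEvens l := by
  induction l using pvEvens.induct with
  | case1 => simp [pvEvens]
  | case2 x => simp [pvEvens, List.range_succ]
  | case3 x y xs ih =>
    have hc : ((x :: y :: xs).length + 1) / 2 = (xs.length + 1) / 2 + 1 := by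
      simp; omega
    rw [hc, List.range_succ_eq_map, List.filterMap_cons]
    simp only [Nat.mul_zero, List.getElem?_cons_zero, List.filterMap_map]
    rw [show ((fun k => (x :: y :: xs)[2 * k]?) ∘ Nat.succ) = fun k => xs[2 * k]? by
      funext k
      simp only [Function.comp_apply]
      rw [show 2 * Nat.succ k = (2 * k) + 1 + 1 by omega]
      simp]
    rw [ih]
    rfl

theorem pvSlice2_none {α : Type} (l : List α) :
    (PySem.List.slice? l none none 2).getD [] = pvEvens l := by
  rw [← pvFilterMap_range_evens]
  simp only [PySem.List.slice?, PySem.List.sliceIndices]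
  norm_num
  rw [show (if 0 < l.length then (((l.length : Int) + 2 - 1) / 2).toNat else 0) = (l.length + 1) / 2 by split <;> omega]
  refine List.filterMap_congr ?_
  intro k _
  rw [show (2 * (k : Int)) = ((2 * k : Nat) : Int) by push_cast; ring, Int.toNat_natCast]

theorem pvSlice2_one {α : Type} (l : List α) :
    (PySem.List.slice? l (some 1) none 2).getD [] = pvEvens l.tail := by
  rw [← pvFilterMap_range_evens]
  cases l with
  | nil => simp [PySem.List.slice?, PySem.List.sliceIndices]
  | cons a t =>
    simp only [PySem.List.slice?, PySem.List.sliceIndices]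
    norm_num
    rw [show (if 0 < t.length then (((t.length : Int) + 2 - 1) / 2).toNat else 0) = (t.length + 1) / 2 by split <;> omega]
    refine List.filterMap_congr ?_
    intro k _
    rw [show (1 + 2 * (k : Int)) = ((2 * k + 1 : Nat) : Int) by push_cast; ring, Int.toNat_natCast]
    simp

-- A's loop as structural recursion carrying the running index parity
def pvLoopA (f : String → String) : Nat → List String × List String → List String → List String × List String
  | _, acc, [] => acc
  | k, acc, b :: bs =>
    if k % 2 = 0 then pvLoopA f (k + 1) (acc.1 ++ [f b], acc.2) bs
    else pvLoopA f (k + 1) (acc.1, acc.2 ++ [f b]) bs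

theorem pvLoopA_append (f : String → String) (xs : List String) (x : String) (k : Nat) (acc : List String × List String) :
    pvLoopA f k acc (xs ++ [x]) =
      (if (k + xs.length) % 2 = 0 then ((pvLoopA f k acc xs).1 ++ [f x], (pvLoopA f k acc xs).2)
       else ((pvLoopA f k acc xs).1, (pvLoopA f k acc xs).2 ++ [f x])) := by
  induction xs generalizing k acc with
  | nil => simp [pvLoopA]
  | cons b bs ih =>
    simp only [List.cons_append, pvLoopA]
    by_cases h : k % 2 = 0 <;>
      simp only [h, if_pos, if_neg, not_false_iff, ih, List.length_cons,
        show (k + 1 + bs.length) % 2 = (k + (bs.length + 1)) % 2 by omega]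

theorem pvLoopA_spec (f : String → String) (l : List String) (k : Nat) (p d : List String) :
    pvLoopA f k (p, d) l =
      if k % 2 = 0 then (p ++ (pvEvens l).map f, d ++ (pvEvens l.tail).map f)
      else (p ++ (pvEvens l.tail).map f, d ++ (pvEvens l).map f) := by
  induction l using pvEvens.induct generalizing k p d with
  | case1 => simp [pvLoopA, pvEvens]
  | case2 x => by_cases h : k % 2 = 0 <;> simp [pvLoopA, pvEvens, h]
  | case3 x y xs ih =>
    by_cases h : k % 2 = 0
    · have h1 : ¬ (k + 1) % 2 = 0 := by omega
      have h2 : (k + 2) % 2 = 0 := by omega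
      simp only [pvLoopA, h, if_pos, h1, if_neg, not_false_iff]
      rw [show k + 1 + 1 = k + 2 from rfl, ih (k+2), if_pos h2]
      simp only [List.tail_cons, pvEvens_cons_tail y xs]
      simp [pvEvens]
    · have h1 : (k + 1) % 2 = 0 := by omega
      have h2 : ¬ (k + 2) % 2 = 0 := by omega
      simp only [pvLoopA, h, if_neg, h1, if_pos, not_false_iff]
      rw [show k + 1 + 1 = k + 2 from rfl, ih (k+2), if_neg h2]
      simp only [List.tail_cons, pvEvens_cons_tail y xs]
      simp [pvEvens]

theorem pvFold_eq_loopA (f : String → String) (l : List String) :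
    (PySem.List.pyRange 0 (l.length : Int) 1).foldl
      (fun acc i =>
        let b := PySem.List.pyGetD l i ""
        if PySem.Int.mod i 2 = 0 then (acc.1 ++ [f b], acc.2)
        else (acc.1, acc.2 ++ [f b]))
      ([], []) = pvLoopA f 0 ([], []) l := by
  induction l using List.reverseRecOn with
  | nil => simp [PySem.List.pyRange_one_eq_nil, pvLoopA]
  | append_singleton xs x ih =>
    have hlen : ((xs ++ [x]).length : Int) = (xs.length : Int) + 1 := by simp
    rw [hlen, PySem.List.pyRange_one_succ_right (Int.natCast_nonneg _), List.foldl_append]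
    have hcongr :
        (PySem.List.pyRange 0 (xs.length : Int) 1).foldl
          (fun acc i =>
            let b := PySem.List.pyGetD (xs ++ [x]) i ""
            if PySem.Int.mod i 2 = 0 then (acc.1 ++ [f b], acc.2)
            else (acc.1, acc.2 ++ [f b])) ([], []) =
        (PySem.List.pyRange 0 (xs.length : Int) 1).foldl
          (fun acc i =>
            let b := PySem.List.pyGetD xs i ""
            if PySem.Int.mod i 2 = 0 then (acc.1 ++ [f b], acc.2)
            else (acc.1, acc.2 ++ [f b])) ([], []) := by
      apply PySem.List.foldl_congr_mem
      intro acc i hi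
      have hmem := (PySem.List.mem_pyRange_one).1 hi
      have hget : PySem.List.pyGetD (xs ++ [x]) i "" = PySem.List.pyGetD xs i "" := by
        rw [PySem.List.pyGetD_eq_getElem (xs ++ [x]) "" hmem.1 (by simp; omega),
            PySem.List.pyGetD_eq_getElem xs "" hmem.1 (by omega)]
        exact List.getElem_append_left (by omega)
      simp only [hget]
    rw [hcongr, ih]
    have hget2 : PySem.List.pyGetD (xs ++ [x]) (xs.length : Int) "" = x := by
      have hlt : ((xs.length : Int)) < ((xs ++ [x]).length : Int) := by
        simp
      rw [PySem.List.pyGetD_eq_getElem (xs ++ [x]) "" (Int.natCast_nonneg _) hlt]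
      simp
    have hmod : PySem.Int.mod (xs.length : Int) 2 = ((xs.length % 2 : Nat) : Int) :=
      PySem.Int.mod_natCast _ _
    rw [pvLoopA_append]
    simp only [List.foldl_cons, List.foldl_nil, hget2, hmod, Nat.zero_add, Nat.cast_eq_zero]

-- ===== VERDICT (by name: the statement is the Claim_ definition above) =====
theorem extract_prompt_and_dialogue_spec : Claim_equal_extract_prompt_and_dialogue := by
  intro story _ _
  unfold Spec_extract_prompt_and_dialogue
  simp only [extract_prompt_and_dialogue, extract_prompt_and_dialogue_alt]
  rw [pvFold_eq_loopA, pvLoopA_spec, pvSlice2_none, pvSlice2_one]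
  simp
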